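-- pv_equiv track=rewrite | github.com/Plawn/petit_publipost_gateway | app/template_engine/docx_publiposting/utils.py | xml_cleaner
-- ===== SOURCE A (Python) =====
-- from typing import Generator, Iterable
--
-- def xml_cleaner(words: Iterable) -> Generator[str, None, None]:
--     """Enlève les tags XML résiduels pour une liste de mots"""
--     for word in words:
--         chars = list()
--         in_tag = False
--         for char in word:
--             if char == "<":
--                 in_tag = True
--             elif char == ">":
--                 in_tag = False
--             elif not in_tag:
--                 chars.append(char)
--         yield ''.join(chars)
-- ===== SOURCE B (Python) =====
-- from typing import Generator, Iterable
--
-- def _strip_tags(word: str) -> str: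
--     out = []
--     i, n = 0, len(word)
--     while i < n:
--         c = word[i]
--         if c == '<':
--             i += 1
--             while i < n and word[i] != '>':
--                 i += 1
--             i += 1  # skip the closing '>' if present
--         elif c == '>':
--             i += 1
--         else:
--             out.append(c)
--             i += 1
--     return ''.join(out)
--
-- def xml_cleaner(words: Iterable) -> Generator[str, None, None]:
--     for word in words:
--         yield _strip_tags(word)
-- ===== Notes on version B (the rewrite author's own statement) =====
-- stated objective: alternative
-- what changed: B replaces A's per-character boolean in_tag state machine with a two-level index scanner that, on '<', consumes the whole tag run (up to and including the next '>') in an inner loop, so no flag is carried across iterations.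
import Mathlib
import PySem

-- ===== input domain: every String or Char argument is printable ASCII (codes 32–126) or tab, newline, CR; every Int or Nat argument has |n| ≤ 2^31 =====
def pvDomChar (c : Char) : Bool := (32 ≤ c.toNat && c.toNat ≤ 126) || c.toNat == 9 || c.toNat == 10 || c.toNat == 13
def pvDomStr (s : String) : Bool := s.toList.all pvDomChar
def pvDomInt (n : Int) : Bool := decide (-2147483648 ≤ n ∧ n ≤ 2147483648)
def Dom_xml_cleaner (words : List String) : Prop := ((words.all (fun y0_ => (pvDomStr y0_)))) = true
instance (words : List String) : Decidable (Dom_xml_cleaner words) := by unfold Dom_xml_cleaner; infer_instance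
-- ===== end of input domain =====

-- ===== PORT A =====
-- B changes: a two-level tag-run scanner instead of A's in_tag flag state machine (alternative, same cost).
-- A's loop body: fold over the characters carrying (collected chars, in_tag flag).
def pvStepA (st : List Char × Bool) (c : Char) : List Char × Bool :=
  if c = '<' then (st.1, true)
  else if c = '>' then (st.1, false)
  else if st.2 = false then (st.1 ++ [c], st.2)
  else st

def xml_cleaner (words : List String) : List String :=
  words.map (fun word => String.ofList (word.toList.foldl pvStepA ([], false)).1)

-- ===== PORT B =====
-- inner `while` of B: skip up to and including the first '>'
def pvSkipTag (cs : List Char) : List Char :=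
  match cs with
  | [] => []
  | c :: rest => if c = '>' then rest else pvSkipTag rest

theorem pvSkipTag_length (cs : List Char) : (pvSkipTag cs).length ≤ cs.length := by
  induction cs with
  | nil => simp [pvSkipTag]
  | cons c rest ih =>
    simp only [pvSkipTag]
    split
    · simp
    · exact Nat.le_trans ih (Nat.le_succ _)

-- outer scan of B's _strip_tags
def pvStrip (cs : List Char) : List Char :=
  match cs with
  | [] => []
  | c :: rest =>
    if c = '<' then pvStrip (pvSkipTag rest)
    else if c = '>' then pvStrip rest
    else c :: pvStrip rest
termination_by cs.length
decreasing_by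
  · exact Nat.lt_succ_of_le (pvSkipTag_length rest)
  · simp
  · simp

def xml_cleaner_alt (words : List String) : List String :=
  words.map (fun word => String.ofList (pvStrip word.toList))

-- ===== PRECONDITION & SPEC =====
def Spec_xml_cleaner (words : List String) (out : List String) : Prop := out = xml_cleaner_alt words
instance (words : List String) (out : List String) : Decidable (Spec_xml_cleaner words out) := by unfold Spec_xml_cleaner; infer_instance

-- ===== CLAIM (what is proved, stated in full; the proofs are below) =====
def Claim_equal_xml_cleaner : Prop := ∀ (words : List String), Dom_xml_cleaner words → Spec_xml_cleaner words (xml_cleaner words)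

-- ===== LEMMAS AND PROOFS =====
-- while in_tag=true, A skips characters up to and including the first '>': the fold from tag=true
-- equals the fold from tag=false on the suffix pvSkipTag cs
theorem pvFold_true (cs : List Char) (acc : List Char) :
    (cs.foldl pvStepA (acc, true)).1 = ((pvSkipTag cs).foldl pvStepA (acc, false)).1 := by
  induction cs generalizing acc with
  | nil => simp [List.foldl, pvSkipTag]
  | cons c rest ih =>
    by_cases h : c = '>'
    · simp [List.foldl, pvStepA, pvSkipTag, h]
    · by_cases h2 : c = '<'
      · simp [List.foldl, pvStepA, pvSkipTag, h, h2, ih]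
      · simp [List.foldl, pvStepA, pvSkipTag, h, h2, ih]

theorem pvFold_strip (cs : List Char) (acc : List Char) :
    ((cs.foldl pvStepA (acc, false)).1) = acc ++ pvStrip cs := by
  induction cs using pvStrip.induct generalizing acc with
  | case1 => simp [List.foldl, pvStrip]
  | case2 rest ih =>
    rw [pvStrip]
    simp only [List.foldl, pvStepA, if_true]
    rw [pvFold_true, ih]
  | case3 rest h ih =>
    rw [pvStrip]
    simp [List.foldl, pvStepA, ih]
  | case4 c rest h h2 ih =>
    rw [pvStrip]
    simp only [List.foldl, pvStepA, if_neg h, if_neg h2, if_true]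
    rw [ih (acc ++ [c])]
    simp

-- ===== VERDICT (by name: the statement is the Claim_ definition above) =====
theorem xml_cleaner_spec : Claim_equal_xml_cleaner := by
  intro words _
  unfold Spec_xml_cleaner xml_cleaner xml_cleaner_alt
  refine List.map_congr_left (fun w _ => ?_)
  rw [pvFold_strip w.toList []]
  simp
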